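-- pv_equiv track=rewrite | github.com/ycyxycm/xb_study | gx/xb/backend/fiance.py | AfterSales_cleaning1
-- ===== SOURCE A (Python) =====
-- def AfterSales_cleaning1(info_list,invoicing_list):
--     #二次处理
--     for i in info_list:
--         if "YFLJ" in i[3]:
--             i.append("邮费")
--         elif "白坯" in i[3]:
--             i.append("白坯")
--         elif "DF" in i[3]:
--             i.append("代发")
--         elif "HCY" in i[3]:
--             i.append("代发")
--         elif "NQ" in i[3]:
--             i.append("代发")
--         elif "烫画" in i[3]:
--             i.append("烫画")
--         elif "DS" in i[3]:
--             i.append("代发")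
--         elif "HC" in i[3]:
--             i.append("代发")
--         elif "辅料" in i[3]:
--             i.append("辅料")
--         elif "运费补差价" in i[3]:
--             i.append("邮费")
--         elif "邮费" in i[3]:
--             i.append("邮费")
--         elif "-CP" in i[2]:
--             i.append("CP")
--         elif "-福袋" in i[2]:
--             i.append("福袋")
--         else:
--             i.append("")
--     in_list = ",".join(invoicing_list)
--     #三次处理
--     for i in info_list:
--         if i[0] in in_list:
--             i.append("已出库")
--         else:
--             i.append("")
--     return info_list
-- ===== SOURCE B (Python) =====
-- # Rule-major staged labelling: instead of running a first-match cascade per row,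
-- # sweep the rows once PER RULE, labelling still-unlabelled rows; priority is
-- # preserved because earlier rules sweep first and a set label is never overwritten.
-- # Returns the same value as A; unlike A it does not mutate info_list's rows in place.
-- RULES = [
--     (3, "YFLJ", "邮费"), (3, "白坯", "白坯"), (3, "DF", "代发"), (3, "HCY", "代发"),
--     (3, "NQ", "代发"), (3, "烫画", "烫画"), (3, "DS", "代发"), (3, "HC", "代发"),
--     (3, "辅料", "辅料"), (3, "运费补差价", "邮费"), (3, "邮费", "邮费"),
--     (2, "-CP", "CP"), (2, "-福袋", "福袋"),
-- ]
--
-- def AfterSales_cleaning1(info_list, invoicing_list):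
--     pending = [(row, None) for row in info_list]
--     for idx, sub, lab in RULES:
--         pending = [(row, l) if l is not None or sub not in row[idx] else (row, lab)
--                    for row, l in pending]
--     in_list = ",".join(invoicing_list)
--     return [row + [l if l is not None else "",
--                    "已出库" if row[0] in in_list else ""]
--             for row, l in pending]
-- ===== Notes on version B (the rewrite author's own statement) =====
-- stated objective: alternative
-- what changed: Inverts the loop nesting: instead of A's per-row 13-branch first-match if-elif cascade, B makes one staged sweep over all rows per rule (rule-major), labelling only still-unlabelled rows so earlier rules keep priority, then a final pass appends label and shipped mark; B builds new rows rather than mutating in place.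
import Mathlib
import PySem

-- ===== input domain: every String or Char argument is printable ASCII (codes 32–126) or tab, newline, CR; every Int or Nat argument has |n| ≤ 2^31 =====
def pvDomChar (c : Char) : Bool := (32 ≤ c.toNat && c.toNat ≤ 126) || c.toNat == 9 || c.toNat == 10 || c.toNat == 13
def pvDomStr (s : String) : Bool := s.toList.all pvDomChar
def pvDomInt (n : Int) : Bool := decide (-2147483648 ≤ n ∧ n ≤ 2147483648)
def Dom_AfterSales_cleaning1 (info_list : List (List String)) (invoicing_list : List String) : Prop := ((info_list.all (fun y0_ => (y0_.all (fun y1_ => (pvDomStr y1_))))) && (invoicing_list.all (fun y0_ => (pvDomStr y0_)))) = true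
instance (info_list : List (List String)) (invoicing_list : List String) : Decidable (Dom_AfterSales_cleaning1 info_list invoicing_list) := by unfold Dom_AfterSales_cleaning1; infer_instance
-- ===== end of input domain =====

-- B inverts the loop nesting (one staged sweep over the rows per rule instead of A's per-row
-- if-elif cascade); equivalence is about the RETURN value only (A mutates info_list's rows in place,
-- B builds new rows).

-- ===== PORT A =====
-- row step of A's first loop (the if-elif cascade appending the category)
def labelA (i : List String) : List String :=
  if PySem.Str.isIn "YFLJ" ((PySem.List.pyGet? i 3).getD "") then i ++ ["邮费"]
  else if PySem.Str.isIn "白坯" ((PySem.List.pyGet? i 3).getD "") then i ++ ["白坯"]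
  else if PySem.Str.isIn "DF" ((PySem.List.pyGet? i 3).getD "") then i ++ ["代发"]
  else if PySem.Str.isIn "HCY" ((PySem.List.pyGet? i 3).getD "") then i ++ ["代发"]
  else if PySem.Str.isIn "NQ" ((PySem.List.pyGet? i 3).getD "") then i ++ ["代发"]
  else if PySem.Str.isIn "烫画" ((PySem.List.pyGet? i 3).getD "") then i ++ ["烫画"]
  else if PySem.Str.isIn "DS" ((PySem.List.pyGet? i 3).getD "") then i ++ ["代发"]
  else if PySem.Str.isIn "HC" ((PySem.List.pyGet? i 3).getD "") then i ++ ["代发"]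
  else if PySem.Str.isIn "辅料" ((PySem.List.pyGet? i 3).getD "") then i ++ ["辅料"]
  else if PySem.Str.isIn "运费补差价" ((PySem.List.pyGet? i 3).getD "") then i ++ ["邮费"]
  else if PySem.Str.isIn "邮费" ((PySem.List.pyGet? i 3).getD "") then i ++ ["邮费"]
  else if PySem.Str.isIn "-CP" ((PySem.List.pyGet? i 2).getD "") then i ++ ["CP"]
  else if PySem.Str.isIn "-福袋" ((PySem.List.pyGet? i 2).getD "") then i ++ ["福袋"]
  else i ++ [""]

-- row step of A's second loop (Pre_ guarantees the .getD defaults are never used)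
def shipA (in_list : String) (i : List String) : List String :=
  if PySem.Str.isIn ((PySem.List.pyGet? i 0).getD "") in_list then i ++ ["已出库"] else i ++ [""]

def AfterSales_cleaning1 (info_list : List (List String)) (invoicing_list : List String) : List (List String) :=
  let step1 := info_list.map labelA
  let in_list := PySem.Str.join "," invoicing_list
  step1.map (shipA in_list)

-- ===== PORT B =====
def pvRules : List (Int × String × String) :=
  [(3, "YFLJ", "邮费"), (3, "白坯", "白坯"), (3, "DF", "代发"), (3, "HCY", "代发"),
   (3, "NQ", "代发"), (3, "烫画", "烫画"), (3, "DS", "代发"), (3, "HC", "代发"),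
   (3, "辅料", "辅料"), (3, "运费补差价", "邮费"), (3, "邮费", "邮费"),
   (2, "-CP", "CP"), (2, "-福袋", "福袋")]

-- one rule's sweep step on a (row, label?) pair: label only still-unlabelled matching rows
def stepRule (r : Int × String × String) (p : List String × Option String) : List String × Option String :=
  if p.2.isSome || !(PySem.Str.isIn r.2.1 ((PySem.List.pyGet? p.1 r.1).getD "")) then p
  else (p.1, some r.2.2)

def AfterSales_cleaning1_alt (info_list : List (List String)) (invoicing_list : List String) : List (List String) :=
  let pending := info_list.map (fun row => (row, (none : Option String)))
  let labeled := pvRules.foldl (fun acc r => acc.map (stepRule r)) pending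
  let in_list := PySem.Str.join "," invoicing_list
  labeled.map (fun p =>
    p.1 ++ [p.2.getD "",
            if PySem.Str.isIn ((PySem.List.pyGet? p.1 0).getD "") in_list then "已出库" else ""])

-- ===== PRECONDITION & SPEC =====
-- Pre_ excludes exactly the inputs where the Pythons raise IndexError: both access i[3] (and i[0]) of every row.
def Pre_AfterSales_cleaning1 (info_list : List (List String)) (invoicing_list : List String) : Prop :=
  ∀ i ∈ info_list, 4 ≤ i.length
instance (info_list : List (List String)) (invoicing_list : List String) : Decidable (Pre_AfterSales_cleaning1 info_list invoicing_list) := by unfold Pre_AfterSales_cleaning1; infer_instance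

def pvWitness_AfterSales_cleaning1 : List (List String) × List String :=
  ([["7", "x", "a-CP", "DFz"], ["8", "y", "b", "plain"]], ["7", "9"])

def Spec_AfterSales_cleaning1 (info_list : List (List String)) (invoicing_list : List String) (out : List (List String)) : Prop := out = AfterSales_cleaning1_alt info_list invoicing_list
instance (info_list : List (List String)) (invoicing_list : List String) (out : List (List String)) : Decidable (Spec_AfterSales_cleaning1 info_list invoicing_list out) := by unfold Spec_AfterSales_cleaning1; infer_instance

-- ===== CLAIM (what is proved, stated in full; the proofs are below) =====
def Claim_equal_AfterSales_cleaning1 : Prop := ∀ (info_list : List (List String)) (invoicing_list : List String), Dom_AfterSales_cleaning1 info_list invoicing_list → Pre_AfterSales_cleaning1 info_list invoicing_list → Spec_AfterSales_cleaning1 info_list invoicing_list (AfterSales_cleaning1 info_list invoicing_list)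

-- ===== LEMMAS AND PROOFS =====

-- proof-side: the first matching rule's label ('' if none)
def firstLabel : List (Int × String × String) → List String → String
  | [], _ => ""
  | (idx, sub, lab) :: rest, i =>
      if PySem.Str.isIn sub ((PySem.List.pyGet? i idx).getD "") then lab else firstLabel rest i

lemma g3' (a b c d : String) (i : List String) :
    PySem.List.pyGet? (a :: b :: c :: d :: i) 3 = some d := by
  rw [show (3 : Int) = ((3 : Nat) : Int) from rfl, PySem.List.pyGet?_natCast]; simp

lemma g2' (a b c d : String) (i : List String) :
    PySem.List.pyGet? (a :: b :: c :: d :: i) 2 = some c := by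
  rw [show (2 : Int) = ((2 : Nat) : Int) from rfl, PySem.List.pyGet?_natCast]; simp

-- a fold of per-element maps is the map of the per-element folds
lemma foldl_map_comm {α ρ : Type} (g : ρ → α → α) :
    ∀ (rs : List ρ) (xs : List α),
      rs.foldl (fun acc r => acc.map (g r)) xs = xs.map (fun x => rs.foldl (fun p r => g r p) x)
  | [], xs => by simp
  | r :: rs, xs => by
      simp only [List.foldl_cons, foldl_map_comm g rs, List.map_map]
      rfl

-- a set label is never overwritten
lemma foldl_stepRule_some (rs : List (Int × String × String)) (row : List String) (l : String) :
    rs.foldl (fun p r => stepRule r p) (row, some l) = (row, some l) := by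
  induction rs with
  | nil => rfl
  | cons r rs ih => simpa [stepRule] using ih

-- proof-side: the first matching rule's label as an Option
def firstOpt : List (Int × String × String) → List String → Option String
  | [], _ => none
  | (idx, sub, lab) :: rest, i =>
      if PySem.Str.isIn sub ((PySem.List.pyGet? i idx).getD "") then some lab else firstOpt rest i

-- the staged rule sweeps compute exactly the first matching label
lemma foldl_stepRule_none (rs : List (Int × String × String)) (row : List String) :
    rs.foldl (fun p r => stepRule r p) (row, none) = (row, firstOpt rs row) := by
  induction rs with
  | nil => simp [firstOpt]
  | cons r rs ih =>
      obtain ⟨idx, sub, lab⟩ := r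
      rw [List.foldl_cons]
      by_cases h : PySem.Chars.isIn sub.toList ((PySem.List.pyGet? row idx).getD "").toList = true
      · rw [show stepRule (idx, sub, lab) (row, none) = (row, some lab) by simp [stepRule, h],
          foldl_stepRule_some]
        simp [firstOpt, h]
      · have hb : PySem.Chars.isIn sub.toList ((PySem.List.pyGet? row idx).getD "").toList = false := by
          simpa using h
        rw [show stepRule (idx, sub, lab) (row, none) = (row, none) by simp [stepRule, hb], ih]
        simp [firstOpt, hb]

-- the option read with getD "" is exactly firstLabel
lemma firstOpt_getD (rs : List (Int × String × String)) (row : List String) :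
    (firstOpt rs row).getD "" = firstLabel rs row := by
  induction rs with
  | nil => rfl
  | cons r rs ih =>
      obtain ⟨idx, sub, lab⟩ := r
      simp only [firstOpt, firstLabel, apply_ite (fun o : Option String => o.getD ""),
        Option.getD_some, ih]

-- the fold's label, read with getD "", is firstLabel
lemma fold_label (row : List String) :
    ((pvRules.foldl (fun p r => stepRule r p) (row, none)).2).getD "" = firstLabel pvRules row := by
  rw [foldl_stepRule_none, firstOpt_getD]

lemma fold_fst (row : List String) :
    (pvRules.foldl (fun p r => stepRule r p) (row, none)).1 = row := by
  rw [foldl_stepRule_none]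

-- A's first-loop row step is the first-match label appended to the row
lemma label_eq (a b c d : String) (i : List String) :
    labelA (a :: b :: c :: d :: i) =
      (a :: b :: c :: d :: i) ++ [firstLabel pvRules (a :: b :: c :: d :: i)] := by
  simp only [labelA, firstLabel, pvRules, g3', g2', Option.getD_some, List.cons_append,
    apply_ite (fun s : String => (a :: b :: c :: d :: i) ++ [s])]

-- composing A's two row steps gives B's per-row result
lemma row_eq (inl : String) (i : List String) (h : 4 ≤ i.length) :
    shipA inl (labelA i) =
      i ++ [firstLabel pvRules i,
            if PySem.Str.isIn ((PySem.List.pyGet? i 0).getD "") inl then "已出库" else ""] := by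
  rcases i with _ | ⟨a, i⟩; · simp at h
  rcases i with _ | ⟨b, i⟩; · simp at h
  rcases i with _ | ⟨c, i⟩; · simp at h
  rcases i with _ | ⟨d, i⟩; · simp at h
  rw [label_eq]
  simp only [shipA, List.cons_append, PySem.List.pyGet?_zero_cons, Option.getD_some,
    List.append_assoc, List.nil_append,
    apply_ite (fun s : String => a :: b :: c :: d ::
      (i ++ [firstLabel pvRules (a :: b :: c :: d :: i), s]))]

-- ===== VERDICT (by name: the statement is the Claim_ definition above) =====
theorem AfterSales_cleaning1_spec : Claim_equal_AfterSales_cleaning1 := by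
  intro info inv _ hpre
  unfold Spec_AfterSales_cleaning1 AfterSales_cleaning1 AfterSales_cleaning1_alt
  simp only [foldl_map_comm, List.map_map]
  refine List.map_congr_left ?_
  intro i hi
  simp only [Function.comp_apply, fold_label, fold_fst]
  exact row_eq _ i (hpre i hi)
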